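-- pv_equiv track=rewrite | github.com/idelem/aoc-2019 | 4.py | hasPurePair
-- ===== SOURCE A (Python) =====
-- def hasPurePair(lst):
--     for i in range(1, 4):
--         if lst[i-1] != lst[i] == lst[i+1] != lst[i+2]:
--             return True
--     if lst[0] == lst[1] != lst[2]:
--         return True
--     if lst[3] != lst[4] == lst[5]:
--         return True
--     return False
-- ===== SOURCE B (Python) =====
-- def hasPurePair(lst):
--     # run-length scan of the six digits: True iff some maximal run has length exactly 2
--     run = 1
--     found = False
--     for i in range(1, 6):
--         if lst[i] == lst[i - 1]:
--             run += 1
--         else: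
--             found = found or run == 2
--             run = 1
--     return found or run == 2
-- ===== Notes on version B (the rewrite author's own statement) =====
-- stated objective: idiomatic
-- what changed: Replaces the fixed positional boundary checks (three middle-index chains plus two edge cases) with a single run-length scan that tracks the length of each maximal run of equal adjacent digits and reports whether some run has length exactly 2.
-- outside the precondition, e.g. on hasPurePair([1, 1, 2, 3, 4]): A returns True, B raises IndexError
import Mathlib
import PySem

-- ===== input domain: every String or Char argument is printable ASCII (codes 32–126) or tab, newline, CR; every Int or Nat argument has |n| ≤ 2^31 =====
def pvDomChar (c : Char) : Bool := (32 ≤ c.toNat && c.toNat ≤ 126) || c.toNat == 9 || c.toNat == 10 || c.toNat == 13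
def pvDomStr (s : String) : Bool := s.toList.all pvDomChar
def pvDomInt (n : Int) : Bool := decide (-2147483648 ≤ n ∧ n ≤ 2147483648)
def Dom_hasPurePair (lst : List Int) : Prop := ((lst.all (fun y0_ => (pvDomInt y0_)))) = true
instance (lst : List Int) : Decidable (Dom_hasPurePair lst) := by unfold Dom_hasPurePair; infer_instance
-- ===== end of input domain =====

-- B replaces A's fixed positional boundary checks with a run-length scan of the six
-- digits (True iff some maximal run has length exactly 2) — more idiomatic.

-- ===== PORT A =====
def hasPurePair (lst : List Int) : Bool :=
  -- lst[i] (valid under Pre_, indices 0..5); getD 0 only fires outside Pre_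
  let g : Int → Int := fun i => (PySem.List.pyGet? lst i).getD 0
  if (PySem.List.pyRange 1 4 1).any
      (fun i => g (i-1) != g i && g i == g (i+1) && g (i+1) != g (i+2)) then true
  else if g 0 == g 1 && g 1 != g 2 then true
  else if g 3 != g 4 && g 4 == g 5 then true
  else false

-- ===== PORT B =====
-- state = (run, found), exactly Source B's loop over range(1, 6); lst[i] as in port A
def hasPurePair_alt (lst : List Int) : Bool :=
  let g : Int → Int := fun i => (PySem.List.pyGet? lst i).getD 0
  let st :=
    (PySem.List.pyRange 1 6 1).foldl
      (fun (st : Int × Bool) i =>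
        match st with
        | (run, found) =>
          if g i = g (i - 1) then (run + 1, found)
          else (1, found || run == 2))
      (1, false)
  match st with
  | (run, found) => found || run == 2

-- ===== PRECONDITION & SPEC =====
-- Pre_ excludes lists shorter than 6: A raises IndexError on most of them and returns
-- an accidental early True on the rest, where B's scan of indices 0..5 raises IndexError.
def Pre_hasPurePair (lst : List Int) : Prop := 6 ≤ lst.length
instance (lst : List Int) : Decidable (Pre_hasPurePair lst) := by unfold Pre_hasPurePair; infer_instance
def pvWitness_hasPurePair : List Int := [1, 2, 2, 3, 4, 5]

def Spec_hasPurePair (lst : List Int) (out : Bool) : Prop := out = hasPurePair_alt lst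
instance (lst : List Int) (out : Bool) : Decidable (Spec_hasPurePair lst out) := by unfold Spec_hasPurePair; infer_instance

-- ===== CLAIM (what is proved, stated in full; the proofs are below) =====
def Claim_equal_hasPurePair : Prop := ∀ (lst : List Int), Dom_hasPurePair lst → Pre_hasPurePair lst → Spec_hasPurePair lst (hasPurePair lst)

-- ===== LEMMAS AND PROOFS =====

set_option maxRecDepth 100000 in
theorem hasPurePair_six (a b c d e f : Int) (rest : List Int) :
    hasPurePair (a :: b :: c :: d :: e :: f :: rest)
      = hasPurePair_alt (a :: b :: c :: d :: e :: f :: rest) := by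
  have hr : PySem.List.pyRange 1 4 1 = [1, 2, 3] := by decide
  have hr6 : PySem.List.pyRange 1 6 1 = [1, 2, 3, 4, 5] := by decide
  have h1 : PySem.List.pyGet? (a :: b :: c :: d :: e :: f :: rest) 1 = some b := by
    rw [show (1:Int) = ((1:Nat):Int) by norm_num, PySem.List.pyGet?_natCast]; simp
  have h2 : PySem.List.pyGet? (a :: b :: c :: d :: e :: f :: rest) 2 = some c := by
    rw [show (2:Int) = ((2:Nat):Int) by norm_num, PySem.List.pyGet?_natCast]; simp
  have h3 : PySem.List.pyGet? (a :: b :: c :: d :: e :: f :: rest) 3 = some d := by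
    rw [show (3:Int) = ((3:Nat):Int) by norm_num, PySem.List.pyGet?_natCast]; simp
  have h4 : PySem.List.pyGet? (a :: b :: c :: d :: e :: f :: rest) 4 = some e := by
    rw [show (4:Int) = ((4:Nat):Int) by norm_num, PySem.List.pyGet?_natCast]; simp
  have h5 : PySem.List.pyGet? (a :: b :: c :: d :: e :: f :: rest) 5 = some f := by
    rw [show (5:Int) = ((5:Nat):Int) by norm_num, PySem.List.pyGet?_natCast]; simp
  simp only [hasPurePair, hasPurePair_alt, hr, hr6]
  norm_num
  simp only [h1, h2, h3, h4, h5, Option.getD_some]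
  clear h1 h2 h3 h4 h5 hr hr6
  by_cases g1 : a = b <;> by_cases g2 : b = c <;> by_cases g3 : c = d <;>
    by_cases g4 : d = e <;> by_cases g5 : e = f <;>
    simp_all [eq_comm]

-- ===== VERDICT (by name: the statement is the Claim_ definition above) =====
theorem hasPurePair_spec : Claim_equal_hasPurePair := by
  intro lst _ hpre
  unfold Spec_hasPurePair
  match lst, hpre with
  | a :: b :: c :: d :: e :: f :: rest, _ => exact hasPurePair_six a b c d e f rest
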